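-- pv_equiv track=rewrite | github.com/Linutronix/elbe | elbepack/updated.py | fname_replace
-- ===== SOURCE A (Python) =====
-- def fname_replace(s):
--     allowed = "abcdefghijklmnopqrstuvwxyzABCDEFGHIJKLMNOPQRSTUVWXYZ"
--     allowed += "0123456789"
--     allowed += "_-."
--     res = ""
--     for c in s:
--         if c in allowed:
--             res += c
--         else:
--             res += '_'
--     return res
-- ===== SOURCE B (Python) =====
-- import re
--
-- def fname_replace(s):
--     return re.sub(r'[^a-zA-Z0-9_.\-]', '_', s)
-- ===== Notes on version B (the rewrite author's own statement) =====
-- stated objective: idiomatic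
-- what changed: Replaces the explicit loop that tests each character against a 63-char allowed string and accumulates by += with a single regex substitution of the complement character class.
import Mathlib
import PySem

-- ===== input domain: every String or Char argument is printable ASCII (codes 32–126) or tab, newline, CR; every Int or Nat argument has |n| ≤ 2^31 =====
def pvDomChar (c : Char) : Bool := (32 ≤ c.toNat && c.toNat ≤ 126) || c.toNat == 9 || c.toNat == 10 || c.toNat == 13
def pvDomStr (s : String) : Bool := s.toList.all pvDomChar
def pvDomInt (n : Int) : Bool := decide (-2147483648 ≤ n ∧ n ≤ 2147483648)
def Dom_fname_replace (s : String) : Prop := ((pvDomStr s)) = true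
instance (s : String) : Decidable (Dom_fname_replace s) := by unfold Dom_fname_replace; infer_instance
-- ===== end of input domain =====

-- B replaces A's explicit loop with per-character membership in a 63-char string
-- by a single regex substitution of the complement character class (idiomatic).


-- ===== PORT A =====
-- 'c in allowed' on a single character is character membership: ported as list membership.
def fname_replace (s : String) : String :=
  let allowed :=
    "abcdefghijklmnopqrstuvwxyzABCDEFGHIJKLMNOPQRSTUVWXYZ0123456789_-.".toList
  String.mk
    (s.toList.foldl
      (fun res c => if allowed.contains c then res ++ [c] else res ++ ['_']) [])

-- ===== PORT B =====
-- the regex class [^a-zA-Z0-9_.\-]: a char matches the substitution iff it is NOT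
-- in one of the three ranges nor one of '_', '.', '-'
def pvReAllowed (c : Char) : Bool :=
  ('a' ≤ c && c ≤ 'z') || ('A' ≤ c && c ≤ 'Z') || ('0' ≤ c && c ≤ '9') ||
    c == '_' || c == '.' || c == '-'

-- re.sub replaces each matched (= disallowed) character by '_'
def fname_replace_alt (s : String) : String :=
  String.mk (s.toList.map (fun c => if pvReAllowed c then c else '_'))

-- ===== PRECONDITION & SPEC =====
def Spec_fname_replace (s : String) (out : String) : Prop := out = fname_replace_alt s
instance (s : String) (out : String) : Decidable (Spec_fname_replace s out) := by unfold Spec_fname_replace; infer_instance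

-- ===== CLAIM (what is proved, stated in full; the proofs are below) =====
def Claim_equal_fname_replace : Prop := ∀ (s : String), Dom_fname_replace s → Spec_fname_replace s (fname_replace s)

-- ===== LEMMAS AND PROOFS =====

def pvAllowedList : List Char :=
  "abcdefghijklmnopqrstuvwxyzABCDEFGHIJKLMNOPQRSTUVWXYZ0123456789_-.".toList

set_option maxRecDepth 4000 in
theorem pvAgree_ofNat : ∀ n < 127,
    pvAllowedList.contains (Char.ofNat n) = pvReAllowed (Char.ofNat n) := by decide

theorem pvAgree (c : Char) (h : pvDomChar c = true) :
    pvAllowedList.contains c = pvReAllowed c := by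
  have hn : c.toNat < 127 := by
    simp [pvDomChar] at h
    omega
  have := pvAgree_ofNat c.toNat hn
  rwa [Char.ofNat_toNat] at this

theorem pvFold (l : List Char) (h : l.all pvDomChar = true) : ∀ acc : List Char,
    l.foldl (fun res c => if pvAllowedList.contains c then res ++ [c] else res ++ ['_']) acc
      = acc ++ l.map (fun c => if pvReAllowed c then c else '_') := by
  induction l with
  | nil => simp
  | cons c t ih =>
    simp only [List.all_cons, Bool.and_eq_true] at h
    intro acc
    simp only [List.foldl_cons, List.map_cons]
    rw [ih h.2, pvAgree c h.1]
    by_cases hc : pvReAllowed c = true <;> simp [hc]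

-- ===== VERDICT (by name: the statement is the Claim_ definition above) =====
theorem fname_replace_spec : Claim_equal_fname_replace := by
  intro s hd
  unfold Spec_fname_replace fname_replace fname_replace_alt
  have := pvFold s.toList hd []
  simp only [List.nil_append] at this
  exact congrArg String.mk this
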